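-- pv_equiv track=rewrite | github.com/luckashish/HackerRankProblemsSolutions | the_xor_problem.py | maxXorValue
-- ===== SOURCE A (Python) =====
-- def maxXorValue(x, k):
--     # Write your code here
--     ans = ''
--     for i in x:
--         if k > 0:
--             if '0' == i:
--                 ans += '1'
--                 k -= 1
--             else:
--                 ans += '0'
--         else:
--             ans += '0'
--     return ans
-- ===== SOURCE B (Python) =====
-- def maxXorValue(x, k):
--     # Divide and conquer: split the string in half, spend the budget on the left
--     # half first (it absorbs min(budget, number-of-zeros-on-the-left) flips),
--     # then recurse on the right with the remaining budget.
--     def go(s, budget):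
--         if len(s) <= 1:
--             if not s:
--                 return ''
--             return '1' if (budget > 0 and s == '0') else '0'
--         m = len(s) // 2
--         left, right = s[:m], s[m:]
--         used = min(max(budget, 0), left.count('0'))
--         return go(left, budget) + go(right, budget - used)
--     return go(x, k)
-- ===== Notes on version B (the rewrite author's own statement) =====
-- stated objective: alternative
-- what changed: Replaces A's single left-to-right budget-threading scan with a recursive divide-and-conquer: split the string in half, compute how much budget the left half consumes as min(max(k,0), zeros-in-left) via a count, then solve the two halves independently and concatenate.
import Mathlib
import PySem

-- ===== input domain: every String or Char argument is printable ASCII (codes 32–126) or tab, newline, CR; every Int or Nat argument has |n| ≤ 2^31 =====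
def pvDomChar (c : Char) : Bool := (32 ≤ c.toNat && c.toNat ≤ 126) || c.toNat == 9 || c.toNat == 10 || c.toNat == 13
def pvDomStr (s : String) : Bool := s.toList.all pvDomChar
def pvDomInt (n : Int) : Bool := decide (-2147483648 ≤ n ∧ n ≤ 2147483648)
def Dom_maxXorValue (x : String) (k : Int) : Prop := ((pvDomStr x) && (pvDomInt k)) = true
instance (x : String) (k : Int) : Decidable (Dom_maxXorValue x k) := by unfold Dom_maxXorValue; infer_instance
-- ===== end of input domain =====

-- B replaces A's single budget-threading scan with a divide-and-conquer recursion: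
-- split the string in half, the left half consumes min(max(k,0), zeros-in-left) of
-- the budget, recurse on both halves and concatenate (objective: alternative).

-- ===== PORT A =====
def maxXorValue (x : String) (k : Int) : String :=
  let st := x.toList.foldl (fun (st : List Char × Int) i =>
    if st.2 > 0 then
      if '0' = i then (st.1 ++ ['1'], st.2 - 1)
      else (st.1 ++ ['0'], st.2)
    else (st.1 ++ ['0'], st.2)) ([], k)
  String.mk st.1

-- ===== PORT B =====
-- Source B's inner 'go', on List Char (s.count('0') is the single-char count = List.count)
def maxXorGo (cs : List Char) (k : Int) : List Char :=
  if h1 : cs.length ≤ 1 then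
    if cs.isEmpty then []
    else if k > 0 && cs == ['0'] then ['1'] else ['0']
  else
    let m := cs.length / 2
    let l := PySem.List.slice cs none (some (m : Int))
    let r := PySem.List.slice cs (some (m : Int)) none
    let used := min (max k 0) ((l.count '0' : Int))
    maxXorGo l k ++ maxXorGo r (k - used)
termination_by cs.length
decreasing_by
  · simp only [PySem.List.slice_to_natCast, List.length_take]; omega
  · simp only [PySem.List.slice_from_natCast, List.length_drop]; omega

def maxXorValue_alt (x : String) (k : Int) : String :=
  String.mk (maxXorGo x.toList k)

-- ===== PRECONDITION & SPEC =====
def Spec_maxXorValue (x : String) (k : Int) (out : String) : Prop := out = maxXorValue_alt x k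
instance (x : String) (k : Int) (out : String) : Decidable (Spec_maxXorValue x k out) := by unfold Spec_maxXorValue; infer_instance

-- ===== CLAIM (what is proved, stated in full; the proofs are below) =====
def Claim_equal_maxXorValue : Prop := ∀ (x : String) (k : Int), Dom_maxXorValue x k → Spec_maxXorValue x k (maxXorValue x k)

-- ===== LEMMAS AND PROOFS =====

-- reference recursion: A's loop, written structurally
def pvF : List Char → Int → List Char
  | [], _ => []
  | c :: cs, k =>
    if k > 0 then
      if '0' = c then '1' :: pvF cs (k - 1) else '0' :: pvF cs k
    else '0' :: pvF cs k

lemma pvA_fold (cs : List Char) : ∀ (acc : List Char) (k : Int),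
    (cs.foldl (fun (st : List Char × Int) i =>
      if st.2 > 0 then
        if '0' = i then (st.1 ++ ['1'], st.2 - 1)
        else (st.1 ++ ['0'], st.2)
      else (st.1 ++ ['0'], st.2)) (acc, k)).1 = acc ++ pvF cs k := by
  induction cs with
  | nil => intro acc k; simp [pvF]
  | cons c cs ih =>
    intro acc k
    simp only [List.foldl_cons, pvF]
    split_ifs with h1 h2 <;> simp [ih, List.append_assoc]

-- A's scan splits at any point: the right part runs with the budget minus what the left consumed
lemma pvF_append (l : List Char) : ∀ (r : List Char) (k : Int),
    pvF (l ++ r) k = pvF l k ++ pvF r (k - min (max k 0) (l.count '0' : Int)) := by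
  induction l with
  | nil =>
    intro r k
    have h0 : k - min (max k 0) ((([] : List Char).count '0' : Int)) = k := by
      simp only [List.count_nil, Nat.cast_zero]; omega
    simp only [List.nil_append, pvF, h0]
  | cons c l ih =>
    intro r k
    by_cases hk : k > 0
    · by_cases hc : c = '0'
      · subst hc
        have hcnt : (((('0':Char)) :: l).count '0' : Int) = (l.count '0' : Int) + 1 := by
          simp
        have hb : (k - 1) - min (max (k - 1) 0) (l.count '0' : Int)
            = k - min (max k 0) ((l.count '0' : Int) + 1) := by
          have : (0:Int) ≤ (l.count '0' : Int) := by positivity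
          omega
        simp only [List.cons_append, pvF, if_pos hk, ih, hcnt, hb, if_true]
      · have hcnt : ((c :: l).count '0' : Int) = (l.count '0' : Int) := by
          simp [hc]
        have h0c : ¬ ('0' = c) := fun h => hc h.symm
        simp only [List.cons_append, pvF, if_pos hk, if_neg h0c, ih, hcnt]
    · have h1 : min (max k 0) ((c :: l).count '0' : Int) = 0 := by
        have : (0:Int) ≤ ((c :: l).count '0' : Int) := by positivity
        omega
      have h2 : min (max k 0) (l.count '0' : Int) = 0 := by
        have : (0:Int) ≤ (l.count '0' : Int) := by positivity
        omega
      simp only [List.cons_append, pvF, if_neg hk, ih, h1, h2]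

lemma pvGo_eq_pvF : ∀ (n : Nat) (cs : List Char), cs.length = n →
    ∀ k : Int, maxXorGo cs k = pvF cs k := by
  intro n
  induction n using Nat.strong_induction_on with
  | _ n ih =>
    intro cs hn k
    by_cases h1 : cs.length ≤ 1
    · match cs with
      | [] => simp [maxXorGo, pvF]
      | [c] =>
        rw [maxXorGo]
        simp only [List.length_singleton, le_refl, dif_pos, List.isEmpty_cons,
          Bool.false_eq_true, if_false]
        by_cases hk : k > 0
        · by_cases hc : c = '0'
          · simp [pvF, hk, hc]
          · have h0c : ¬ ('0' = c) := fun h => hc h.symm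
            simp [pvF, hk, hc, h0c]
        · simp [pvF, hk]
      | _ :: _ :: _ => simp at h1
    · rw [maxXorGo, dif_neg h1]
      have hm1 : 1 ≤ cs.length / 2 := by omega
      have hm2 : cs.length / 2 < cs.length := by omega
      simp only [PySem.List.slice_to_natCast, PySem.List.slice_from_natCast]
      have hl : (cs.take (cs.length / 2)).length < n := by
        simp [List.length_take]; omega
      have hr : (cs.drop (cs.length / 2)).length < n := by
        simp [List.length_drop]; omega
      rw [ih _ hl _ rfl, ih _ hr _ rfl, ← pvF_append, List.take_append_drop]

-- ===== VERDICT (by name: the statement is the Claim_ definition above) =====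
theorem maxXorValue_spec : Claim_equal_maxXorValue := by
  intro x k _
  show maxXorValue x k = maxXorValue_alt x k
  simp only [maxXorValue, maxXorValue_alt]
  rw [pvA_fold, List.nil_append, pvGo_eq_pvF _ _ rfl]
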